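-- pv_equiv track=rewrite | github.com/windy825/language | 0225/암호생성기.py | func
-- ===== SOURCE A (Python) =====
-- def func(line):
--     cnt = 0
--     while True:
--         move = 0
--         for i in range(8):          # 8번을 돌면서 각 위치마다 알맞은 수(1~5) 를 계속 빼줍니다
--             if cnt ==5:
--                 cnt = 0
--             cnt +=1
--             move +=1
--             line[i] -= cnt
--             if line[i] <= 0:       # 한번이라도 음수나 0이 나오게 되면 함수가 종료되고 몇번 이동했는지 반환합니다.
--                 line[i] =0
--                 return move
-- ===== SOURCE B (Python) =====
-- def func(line):
--     # Closed-form: each position i (of the first 8) is decremented at global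
--     # steps i+1, i+9, i+17, ... by a 5-cycle of amounts; every 5 hits subtract 15.
--     # Compute for each position the global step at which it first reaches <= 0;
--     # the slot with the smallest such step terminates the simulation, and A's
--     # returned `move` is that slot's index + 1.  (Return value only; A also
--     # mutates line in place.)
--     best = None
--     ans = None
--     for i in range(min(8, len(line))):
--         v = line[i]
--         if v <= 0:
--             m = 1
--         else:
--             q = (v - 1) // 15
--             rem = v - 15 * q        # 1 <= rem <= 15
--             s = 0
--             for k in range(5):
--                 s += (i + 3 * k) % 5 + 1
--                 if s >= rem:
--                     m = 5 * q + k + 1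
--                     break
--         step = i + 1 + 8 * (m - 1)
--         if best is None or step < best:
--             best = step
--             ans = i + 1
--     return ans
-- ===== Notes on version B (the rewrite author's own statement) =====
-- stated objective: faster
-- what changed: A simulates the cyclic 1..5 subtraction step by step until a slot reaches 0; B computes for each of the first 8 slots the closed-form step at which it first dies (every 5 hits of a slot subtract exactly 15) and returns the index of the slot with the smallest such step.
import Mathlib
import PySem

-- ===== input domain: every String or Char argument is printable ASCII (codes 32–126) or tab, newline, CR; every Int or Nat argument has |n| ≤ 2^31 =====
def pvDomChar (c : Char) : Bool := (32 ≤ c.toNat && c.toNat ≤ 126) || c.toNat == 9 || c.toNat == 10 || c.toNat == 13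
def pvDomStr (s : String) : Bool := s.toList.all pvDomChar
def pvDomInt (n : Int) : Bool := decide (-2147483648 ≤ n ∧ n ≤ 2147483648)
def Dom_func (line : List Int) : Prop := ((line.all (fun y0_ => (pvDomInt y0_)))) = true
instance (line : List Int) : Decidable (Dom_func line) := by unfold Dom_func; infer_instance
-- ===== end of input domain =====

-- B replaces A's step-by-step simulation by a closed form per slot (objective: faster, asymptotic).
-- Equivalence is about the RETURN value only: Python A mutates `line` in place, B does not.

-- lemmas cited by name in the termination proofs of loopA and findM
theorem pv_sum_set_lt : ∀ (l : List Nat) (i : Nat) (a : Nat), i < l.length → a < l[i]! →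
    ((l.set i a).sum < l.sum) := by
  intro l
  induction l with
  | nil => intro i a h; simp at h
  | cons x xs ih =>
    intro i a h ha
    cases i with
    | zero => simp at ha ⊢; omega
    | succ j =>
      simp only [List.set_cons_succ, List.sum_cons]
      have := ih j a (by simpa using h) (by simpa using ha)
      omega

theorem pv_dec_left (xs : List Int) (c i : Nat) (h : i < xs.length) (hc : 0 < c)
    (hvpos : ¬ xs[i] - (c : Int) ≤ 0) :
    Prod.Lex (· < ·) (· < ·)
      ((((xs.set i (xs[i] - (c : Int))).map Int.toNat).sum), if i + 1 < 8 then 0 else 1)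
      ((((xs.map Int.toNat).sum)), if i < 8 then 0 else 1) := by
  apply Prod.Lex.left
  rw [List.map_set]
  apply pv_sum_set_lt
  · simpa using h
  · rw [List.getElem!_eq_getElem?_getD]
    rw [List.getElem?_map, List.getElem?_eq_getElem h]
    simp only [Option.map_some, Option.getD_some]
    omega

theorem pv_dec_wrap (s i : Nat) (h8 : ¬ i < 8) :
    Prod.Lex (· < ·) (· < ·) (s, if (0:Nat) < 8 then 0 else 1) (s, if i < 8 then 0 else 1) := by
  apply Prod.Lex.right'
  · simp
  · simp [h8]

theorem pv_dec_findM (k : Nat) (h : k < 5) : 5 - (k + 1) < 5 - k := by omega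

-- ===== PORT A =====
-- cnt is always one of 0..5 in the Python; it is a Nat here (exact).
-- The `else 0` branch is where Python raises IndexError (i out of range); Pre_func excludes it.
def loopA (xs : List Int) (cnt : Nat) (move : Int) (i : Nat) : Int :=
  if i < 8 then
    -- if cnt == 5: cnt = 0 ; cnt += 1 ; move += 1
    let c := (if cnt = 5 then 0 else cnt) + 1
    let mv := move + 1
    if h : i < xs.length then
      -- line[i] -= cnt ; if line[i] <= 0: line[i] = 0; return move
      let v := xs[i] - (c : Int)
      if v ≤ 0 then mv
      else loopA (xs.set i v) c mv (i + 1)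
    else 0
  else
    -- end of `for i in range(8)`: back to `while True`, move = 0
    loopA xs cnt 0 0
termination_by ((xs.map Int.toNat).sum, if i < 8 then 0 else 1)
decreasing_by
  · rename_i hi8 hvpos
    exact pv_dec_left xs _ i h (Nat.succ_pos _) hvpos
  · rename_i h8
    exact pv_dec_wrap _ i h8

def func (line : List Int) : Int :=
  loopA line 0 0 0

-- ===== PORT B =====
-- inner `for k in range(5): s += (i+3k)%5+1; if s >= rem: m = 5q+k+1; break`
-- (the k = 5 fall-through is unreachable in Python since rem <= 15; 0 is a totality guard)
def findM (i : Nat) (rem : Int) (q : Int) (s : Int) (k : Nat) : Int :=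
  if k < 5 then
    let s' := s + (((i + 3 * k) % 5 : Nat) : Int) + 1
    if rem ≤ s' then 5 * q + (k : Int) + 1
    else findM i rem q s' (k + 1)
  else 0
termination_by 5 - k
decreasing_by exact pv_dec_findM k (by omega)

-- body of Source B's `for i in range(min(8, len(line)))` loop; state = (best, ans)
def stepB (xs : List Int) (i : Nat) : Int :=
  let v := xs.getD i 0          -- i < line.length at every call site
  let m : Int :=
    if v ≤ 0 then 1
    else
      let q := PySem.Int.floordiv (v - 1) 15
      let rem := v - 15 * q
      findM i rem q 0 0
  (i : Int) + 1 + 8 * (m - 1)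

def bodyB (xs : List Int) (st : Option Int × Option Int) (i : Nat) : Option Int × Option Int :=
  let step := stepB xs i
  match st.1 with
  | none => (some step, some ((i : Int) + 1))
  | some b => if step < b then (some step, some ((i : Int) + 1)) else st

def func_alt (line : List Int) : Int :=
  let st := (List.range (min 8 line.length)).foldl (bodyB line) (none, none)
  match st.2 with
  | some a => a
  | none => 0   -- Source B returns None here (empty line); excluded by Pre_func

-- ===== PRECONDITION & SPEC =====
-- Pre_func holds exactly when Python A returns: with fewer than 8 slots A raises IndexError
-- in its first pass unless some slot i < len already dies at its first hit (amount i%5+1).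
def Pre_func (line : List Int) : Prop :=
  8 ≤ line.length ∨ ∃ i < line.length, line.getD i 0 ≤ ((i % 5 : Nat) : Int) + 1

instance (line : List Int) : Decidable (Pre_func line) := by unfold Pre_func; infer_instance

def pvWitness_func : List Int := [10, 3, 7, 1, 20, 5, 9, 2]

def Spec_func (line : List Int) (out : Int) : Prop := out = func_alt line
instance (line : List Int) (out : Int) : Decidable (Spec_func line out) := by unfold Spec_func; infer_instance

-- ===== CLAIM (what is proved, stated in full; the proofs are below) =====
def Claim_equal_func : Prop := ∀ (line : List Int), Dom_func line → Pre_func line → Spec_func line (func line)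

-- ===== LEMMAS AND PROOFS =====

-- total amount subtracted from slot i by the first t global steps
-- (step u+1, 0-indexed u, touches slot u % 8 with amount u % 5 + 1)
def hitSum (i : Nat) : Nat → Int
  | 0 => 0
  | t+1 => hitSum i t + (if t % 8 = i then ((t % 5 : Nat) : Int) + 1 else 0)

-- Python's cnt after t steps
def cntOf (t : Nat) : Nat := if t = 0 then 0 else (t-1) % 5 + 1

-- the list A has mutated after t steps
def curLine (L : List Int) (t : Nat) : List Int := L.mapIdx (fun j v => v - hitSum j t)

-- step u+1 (if reached) returns
def qualB (L : List Int) (u : Nat) : Bool :=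
  decide (u % 8 < L.length) && decide (L.getD (u % 8) 0 ≤ hitSum (u % 8) (u+1))

-- amount subtracted from slot i by its first m hits
def CumS (i : Nat) : Nat → Int
  | 0 => 0
  | m+1 => CumS i m + (((i + 3*m) % 5 : Nat) : Int) + 1

theorem hitSum_succ_ne (i t : Nat) (h : ¬ t % 8 = i) :
    hitSum i (t+1) = hitSum i t := by simp [hitSum, h]

theorem hitSum_succ_eq (i t : Nat) (h : t % 8 = i) :
    hitSum i (t+1) = hitSum i t + ((t % 5 : Nat) : Int) + 1 := by
  simp [hitSum, h]; ring

theorem hitSum_zero_of_le (i t : Nat) (hti : t ≤ i) (hi : i < 8) : hitSum i t = 0 := by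
  induction t with
  | zero => rfl
  | succ u ih =>
    rw [hitSum_succ_ne i u (by omega), ih (by omega)]

theorem pv_getD (L : List Int) (i : Nat) (h : i < L.length) : L.getD i 0 = L[i] := by
  simp [List.getD_eq_getElem?_getD, List.getElem?_eq_getElem h]

theorem hitSum_eq_of_no_hit (i a b : Nat) (hab : a ≤ b)
    (h : ∀ t, a ≤ t → t < b → ¬ t % 8 = i) : hitSum i b = hitSum i a := by
  induction b with
  | zero =>
    have ha : a = 0 := by omega
    rw [ha]
  | succ u ih =>
    rcases Nat.lt_or_ge a (u+1) with hlt | hge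
    · rw [hitSum_succ_ne i u (h u (by omega) (by omega)), ih (by omega) (fun t ht1 ht2 => h t ht1 (by omega))]
    · have ha : a = u + 1 := by omega
      rw [ha]

theorem CumS_succ (i m : Nat) : CumS i (m+1) = CumS i m + (((i + 3*m) % 5 : Nat) : Int) + 1 := rfl

theorem hitSum_hit (i m : Nat) (hi : i < 8) :
    hitSum i (i + 8*m + 1) = CumS i (m+1) := by
  induction m with
  | zero =>
    rw [hitSum_succ_eq i i (by omega), hitSum_zero_of_le i i (le_refl i) hi]
    simp [CumS]
  | succ m ih =>
    have h1 : i + 8*(m+1) + 1 = (i + 8*m + 8) + 1 := by ring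
    rw [h1, hitSum_succ_eq i (i + 8*m + 8) (by omega)]
    have h2 : hitSum i (i + 8*m + 8) = hitSum i (i + 8*m + 1) := by
      apply hitSum_eq_of_no_hit i _ _ (by omega)
      intro t ht1 ht2
      omega
    rw [h2, ih]
    have h3 : (i + 8*m + 8) % 5 = (i + 3*(m+1)) % 5 := by omega
    rw [h3]
    exact (CumS_succ i (m+1)).symm

theorem CumS_add_five (i m : Nat) : CumS i (m+5) = CumS i m + 15 := by
  have e : m+5 = ((((m+1)+1)+1)+1)+1 := by ring
  rw [e, CumS_succ, CumS_succ, CumS_succ, CumS_succ, CumS_succ]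
  have h0 : (i + 3*m) % 5 + (i + 3*(m+1)) % 5 + (i + 3*(m+2)) % 5 + (i + 3*(m+3)) % 5 + (i + 3*(m+4)) % 5 = 10 := by omega
  push_cast
  push_cast at h0
  linarith [h0]

theorem CumS_mul_five (i q r : Nat) : CumS i (5*q + r) = 15*(q:Int) + CumS i r := by
  induction q with
  | zero => simp
  | succ q ih =>
    have e : 5*(q+1) + r = (5*q + r) + 5 := by ring
    rw [e, CumS_add_five, ih]
    push_cast
    ring

theorem CumS_lt_succ (i m : Nat) : CumS i m < CumS i (m+1) := by
  rw [CumS_succ]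
  have : (0:Int) ≤ (((i + 3*m) % 5 : Nat) : Int) := by positivity
  omega

theorem CumS_mono (i : Nat) {m m' : Nat} (h : m ≤ m') : CumS i m ≤ CumS i m' := by
  induction m' with
  | zero => simp_all
  | succ u ih =>
    rcases Nat.lt_or_ge m (u+1) with hlt | hge
    · exact le_trans (ih (by omega)) (le_of_lt (CumS_lt_succ i u))
    · have : m = u + 1 := by omega
      simp [this]

theorem CumS_five (i : Nat) : CumS i 5 = 15 := by
  have := CumS_mul_five i 1 0
  simpa using this

theorem findM_spec (i : Nat) (rem q : Int) (hrem : rem ≤ 15) :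
    ∀ n k, 5 - k = n → k < 5 → CumS i k < rem →
    ∃ r : Nat, k < r ∧ r ≤ 5 ∧ findM i rem q (CumS i k) k = 5*q + (r:Int) ∧
      rem ≤ CumS i r ∧ CumS i (r-1) < rem := by
  intro n
  induction n with
  | zero => intro k hk; omega
  | succ n ih =>
    intro k hk hk5 hlt
    rw [findM]
    simp only [if_pos hk5]
    have hs' : CumS i k + (((i + 3*k) % 5 : Nat) : Int) + 1 = CumS i (k+1) := (CumS_succ i k).symm
    by_cases hbr : rem ≤ CumS i k + (((i + 3 * k) % 5 : Nat) : Int) + 1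
    · refine ⟨k+1, by omega, by omega, ?_, ?_, ?_⟩
      · rw [if_pos hbr]; push_cast; ring
      · rw [← hs']; exact hbr
      · simpa using hlt
    · rw [if_neg hbr]
      have hk1 : k + 1 < 5 := by
        by_contra hcon
        have : k + 1 = 5 := by omega
        rw [hs', this] at hbr
        rw [CumS_five] at hbr
        omega
      have hlt1 : CumS i (k+1) < rem := by rw [← hs']; omega
      rw [hs']
      obtain ⟨r, hr1, hr2, hr3, hr4, hr5⟩ := ih (k+1) (by omega) hk1 hlt1
      exact ⟨r, by omega, hr2, hr3, hr4, hr5⟩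

theorem stepB_spec (L : List Int) (i : Nat) (hi : i < 8) (hil : i < L.length) :
    ∃ m : Nat, 1 ≤ m ∧ stepB L i = (i : Int) + 1 + 8*((m:Int) - 1) ∧
      L.getD i 0 ≤ CumS i m ∧ (∀ m' : Nat, 1 ≤ m' → L.getD i 0 ≤ CumS i m' → m ≤ m') := by
  by_cases hv : L.getD i 0 ≤ 0
  · have h1 : (1:Int) ≤ CumS i 1 := by
      rw [CumS_succ]
      have : (0:Int) ≤ (((i + 3*0) % 5 : Nat) : Int) := by positivity
      have h0 : CumS i 0 = 0 := rfl
      omega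
    refine ⟨1, le_refl 1, ?_, by omega, fun m' hm' _ => hm'⟩
    simp only [stepB, if_pos hv]
    push_cast
    ring
  · push_neg at hv
    set v := L.getD i 0 with hvdef
    have hfd : PySem.Int.floordiv (v - 1) 15 = (v - 1) / 15 :=
      PySem.Int.floordiv_eq_ediv_of_pos (by omega)
    set q := (v - 1) / 15 with hq
    have hqmod := Int.ediv_add_emod (v - 1) 15
    have hmod1 := Int.emod_nonneg (v - 1) (by norm_num : (15:Int) ≠ 0)
    have hmod2 := Int.emod_lt_of_pos (v - 1) (by norm_num : (0:Int) < 15)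
    have hq0 : 0 ≤ q := by
      rw [hq]; exact Int.ediv_nonneg (by omega) (by norm_num)
    set rem := v - 15 * q with hremdef
    have hrem1 : 1 ≤ rem := by omega
    have hrem15 : rem ≤ 15 := by omega
    obtain ⟨r, hr0, hr5, hfm, hrge, hrlt⟩ :=
      findM_spec i rem q hrem15 5 0 rfl (by norm_num) (by simpa [CumS] using hrem1)
    refine ⟨5*q.toNat + r, by omega, ?_, ?_, ?_⟩
    · have : stepB L i = (i:Int) + 1 + 8 * ((5*q + (r:Int)) - 1) := by
        simp only [stepB, ← hvdef, if_neg (by omega : ¬ v ≤ 0), hfd, ← hq, ← hremdef]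
        rw [show findM i rem q 0 0 = findM i rem q (CumS i 0) 0 from rfl, hfm]
      rw [this]
      have : ((5*q.toNat + r : Nat) : Int) = 5*q + (r:Int) := by
        push_cast; omega
      rw [this]
    · rw [CumS_mul_five]
      have : (q.toNat : Int) = q := by omega
      rw [this]
      omega
    · intro m' hm' hle
      by_contra hcon
      push_neg at hcon
      have hm'le : m' ≤ 5*q.toNat + (r-1) := by omega
      have := CumS_mono i hm'le
      rw [CumS_mul_five] at this
      have hql : (q.toNat : Int) = q := by omega
      rw [hql] at this
      omega

theorem length_curLine (L : List Int) (t : Nat) : (curLine L t).length = L.length := by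
  simp [curLine]

theorem getElem_curLine (L : List Int) (t j : Nat) (h : j < L.length) :
    (curLine L t)[j]'(by simpa [length_curLine] using h) = L[j] - hitSum j t := by
  simp [curLine]

theorem curLine_zero (L : List Int) : curLine L 0 = L := by
  apply List.ext_getElem (by simp [length_curLine])
  intro j h1 h2
  rw [getElem_curLine L 0 j (by simpa [length_curLine] using h1)]
  simp [hitSum]

theorem curLine_set (L : List Int) (t : Nat) (h : t % 8 < L.length) :
    (curLine L t).set (t % 8) (L[t % 8] - hitSum (t % 8) (t+1)) = curLine L (t+1) := by
  apply List.ext_getElem (by simp [length_curLine])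
  intro j h1 h2
  have hj : j < L.length := by simpa [length_curLine] using h2
  by_cases hcase : j = t % 8
  · subst hcase
    rw [List.getElem_set_self]
    rw [getElem_curLine L (t+1) (t % 8) hj]
  · rw [List.getElem_set_ne (by omega)]
    rw [getElem_curLine L t j hj, getElem_curLine L (t+1) j hj]
    rw [hitSum_succ_ne j t (by omega)]

theorem cnt_step (t : Nat) : (if cntOf t = 5 then 0 else cntOf t) + 1 = t % 5 + 1 := by
  unfold cntOf
  split_ifs <;> omega

theorem cntOf_succ (t : Nat) : cntOf (t+1) = t % 5 + 1 := by simp [cntOf]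

theorem loopA_run (L : List Int) (T0 : Nat)
    (hq : qualB L T0 = true) (hmin : ∀ u, u < T0 → qualB L u = false)
    (hreach : ∀ t, t ≤ T0 → t % 8 < L.length) :
    ∀ d t, T0 = t + d →
      loopA (curLine L t) (cntOf t) ((t % 8 : Nat) : Int) (t % 8) = ((T0 % 8 : Nat) : Int) + 1 := by
  intro d
  induction d with
  | zero =>
    intro t ht
    have ht0 : t = T0 := by omega
    subst ht0
    have hlen : t % 8 < L.length := hreach t (le_refl t)
    rw [loopA]
    simp only [if_pos (Nat.mod_lt t (by norm_num) : t % 8 < 8)]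
    rw [dif_pos (by simpa [length_curLine] using hlen)]
    simp only [cnt_step]
    rw [getElem_curLine L t (t % 8) hlen]
    have hcond : L[t % 8] - hitSum (t % 8) t - ((t % 5 + 1 : Nat) : Int) ≤ 0 := by
      have := hitSum_succ_eq (t % 8) t rfl
      simp only [qualB, Bool.and_eq_true, decide_eq_true_eq] at hq
      rw [pv_getD L (t % 8) hlen] at hq
      push_cast
      push_cast at this
      omega
    rw [if_pos hcond]
  | succ d ih =>
    intro t ht
    have hlt : t < T0 := by omega
    have hlen : t % 8 < L.length := hreach t (by omega)
    rw [loopA]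
    simp only [if_pos (Nat.mod_lt t (by norm_num) : t % 8 < 8)]
    rw [dif_pos (by simpa [length_curLine] using hlen)]
    simp only [cnt_step]
    rw [getElem_curLine L t (t % 8) hlen]
    have hnq := hmin t hlt
    simp only [qualB, Bool.and_eq_true, decide_eq_true_eq] at hnq
    have hkey := hitSum_succ_eq (t % 8) t rfl
    have hcond : ¬ (L[t % 8] - hitSum (t % 8) t - ((t % 5 + 1 : Nat) : Int) ≤ 0) := by
      intro hcon
      have htrue : (decide (t % 8 < L.length) &&
          decide (L.getD (t % 8) 0 ≤ hitSum (t % 8) (t+1))) = true := by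
        simp only [Bool.and_eq_true, decide_eq_true_eq]
        refine ⟨hlen, ?_⟩
        rw [pv_getD L (t % 8) hlen]
        push_cast at hcon hkey ⊢
        omega
      rw [htrue] at hnq
      simp at hnq
    rw [if_neg hcond]
    have hset : (curLine L t).set (t % 8) (L[t % 8] - hitSum (t % 8) t - ((t % 5 + 1 : Nat) : Int))
        = curLine L (t+1) := by
      have : L[t % 8] - hitSum (t % 8) t - ((t % 5 + 1 : Nat) : Int)
          = L[t % 8] - hitSum (t % 8) (t+1) := by
        push_cast at hkey ⊢
        omega
      rw [this]
      exact curLine_set L t hlen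
    rw [hset]
    have hcnt : t % 5 + 1 = cntOf (t+1) := (cntOf_succ t).symm
    rw [hcnt]
    by_cases h7 : t % 8 < 7
    · have e1 : t % 8 + 1 = (t+1) % 8 := by omega
      have e2 : ((t % 8 : Nat) : Int) + 1 = (((t+1) % 8 : Nat) : Int) := by
        push_cast; omega
      rw [e1, e2]
      exact ih (t+1) (by omega)
    · have h8 : t % 8 = 7 := by omega
      have e1 : (t + 1) % 8 = 0 := by omega
      rw [h8]
      have eight : loopA (curLine L (t+1)) (cntOf (t+1)) (((7:Nat):Int) + 1) (7 + 1)
          = loopA (curLine L (t+1)) (cntOf (t+1)) 0 0 := by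
        rw [loopA]
        norm_num
      rw [eight]
      have hres := ih (t+1) (by omega)
      rw [e1] at hres
      simpa using hres

-- the first hit of slot i at which it dies qualifies, and is the first qualifying step in its residue class
theorem slot_first (L : List Int) (i : Nat) (hi : i < 8) (hil : i < L.length) :
    ∃ m : Nat, 1 ≤ m ∧ stepB L i = (i : Int) + 1 + 8*((m:Int) - 1) ∧
      qualB L (i + 8*(m-1)) = true ∧
      (∀ u : Nat, u % 8 = i → qualB L u = true → i + 8*(m-1) ≤ u) := by
  obtain ⟨m, hm1, hstep, hle, hmin⟩ := stepB_spec L i hi hil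
  refine ⟨m, hm1, hstep, ?_, ?_⟩
  · simp only [qualB, Bool.and_eq_true, decide_eq_true_eq]
    have hmod : (i + 8*(m-1)) % 8 = i := by omega
    rw [hmod]
    refine ⟨hil, ?_⟩
    rw [hitSum_hit i (m-1) hi]
    have : m - 1 + 1 = m := by omega
    rw [this]
    exact hle
  · intro u humod huq
    simp only [qualB, Bool.and_eq_true, decide_eq_true_eq] at huq
    rw [humod] at huq
    obtain ⟨k, hk⟩ : ∃ k, u = i + 8*k := ⟨(u - i)/8, by omega⟩
    subst hk
    rw [hitSum_hit i k hi] at huq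
    have := hmin (k+1) (by omega) huq.2
    omega

theorem foldB (L : List Int) :
    ∀ n : Nat, 1 ≤ n →
    ∃ j, j < n ∧ (List.range n).foldl (bodyB L) (none, none) = (some (stepB L j), some ((j:Int)+1)) ∧
      (∀ i, i < n → stepB L j ≤ stepB L i) := by
  intro n
  induction n with
  | zero => omega
  | succ n ih =>
    intro _
    rcases Nat.eq_zero_or_pos n with hn0 | hn1
    · subst hn0
      refine ⟨0, by omega, ?_, ?_⟩
      · simp [bodyB, List.range_succ]
      · intro i hi
        interval_cases i
        exact le_refl _
    · obtain ⟨j, hj, hfold, hminj⟩ := ih hn1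
      rw [List.range_succ, List.foldl_append, hfold]
      by_cases hcase : stepB L n < stepB L j
      · refine ⟨n, by omega, ?_, ?_⟩
        · simp [bodyB, hcase]
        · intro i hi
          rcases Nat.lt_or_ge i n with h1 | h2
          · exact le_trans (le_of_lt hcase) (hminj i h1)
          · have : i = n := by omega
            simp [this]
      · refine ⟨j, by omega, ?_, ?_⟩
        · simp [bodyB, hcase]
        · intro i hi
          rcases Nat.lt_or_ge i n with h1 | h2
          · exact hminj i h1
          · have : i = n := by omega
            subst this
            omega

theorem exists_qual (L : List Int) (hpre : Pre_func L) : ∃ u, qualB L u = true := by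
  rcases hpre with h8 | ⟨i, hil, hle⟩
  · obtain ⟨m, hm1, _, hcum, _⟩ := stepB_spec L 0 (by norm_num) (by omega)
    refine ⟨0 + 8*(m-1), ?_⟩
    simp only [qualB, Bool.and_eq_true, decide_eq_true_eq]
    have hmod : (0 + 8*(m-1)) % 8 = 0 := by omega
    rw [hmod]
    refine ⟨by omega, ?_⟩
    rw [hitSum_hit 0 (m-1) (by norm_num)]
    have : m - 1 + 1 = m := by omega
    rw [this]
    exact hcum
  · by_cases hlen : 8 ≤ L.length
    · obtain ⟨m, hm1, _, hcum, _⟩ := stepB_spec L 0 (by norm_num) (by omega)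
      refine ⟨0 + 8*(m-1), ?_⟩
      simp only [qualB, Bool.and_eq_true, decide_eq_true_eq]
      have hmod : (0 + 8*(m-1)) % 8 = 0 := by omega
      rw [hmod]
      refine ⟨by omega, ?_⟩
      rw [hitSum_hit 0 (m-1) (by norm_num)]
      have : m - 1 + 1 = m := by omega
      rw [this]
      exact hcum
    · refine ⟨i, ?_⟩
      simp only [qualB, Bool.and_eq_true, decide_eq_true_eq]
      have hi8 : i < 8 := by omega
      have hmod : i % 8 = i := by omega
      rw [hmod]
      refine ⟨hil, ?_⟩
      rw [hitSum_hit i 0 hi8, CumS_succ]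
      have h0 : CumS i 0 = 0 := rfl
      rw [h0]
      push_cast at hle ⊢
      omega

-- ===== VERDICT (by name: the statement is the Claim_ definition above) =====
theorem func_spec : Claim_equal_func := by
  intro L _ hpre
  unfold Spec_func
  have hex := exists_qual L hpre
  set T0 := Nat.find hex with hT0def
  have hq : qualB L T0 = true := Nat.find_spec hex
  have hmin : ∀ u, u < T0 → qualB L u = false := by
    intro u hu
    have := Nat.find_min hex hu
    simpa using this
  have hlen1 : 1 ≤ L.length := by
    rcases hpre with h | ⟨i, hil, _⟩ <;> omega
  have hreach : ∀ t, t ≤ T0 → t % 8 < L.length := by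
    intro t ht
    by_cases hlen : 8 ≤ L.length
    · have : t % 8 < 8 := Nat.mod_lt t (by norm_num)
      omega
    · rcases hpre with h | ⟨i, hil, hle⟩
      · omega
      · have hi8 : i < 8 := by omega
        have hqi : qualB L i = true := by
          simp only [qualB, Bool.and_eq_true, decide_eq_true_eq]
          have hmod : i % 8 = i := by omega
          rw [hmod]
          refine ⟨hil, ?_⟩
          rw [hitSum_hit i 0 hi8, CumS_succ]
          have h0 : CumS i 0 = 0 := rfl
          rw [h0]
          push_cast at hle ⊢
          omega
        have hT0le : T0 ≤ i := Nat.find_le hqi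
        have : t < 8 := by omega
        have : t % 8 = t := by omega
        omega
  -- A's value
  have hA : func L = ((T0 % 8 : Nat) : Int) + 1 := by
    have := loopA_run L T0 hq hmin hreach T0 0 (by omega)
    rw [curLine_zero] at this
    simpa [func, cntOf] using this
  -- B's value
  set n := min 8 L.length with hndef
  have hn1 : 1 ≤ n := by omega
  -- the slot that fires
  have hi0q := hq
  simp only [qualB, Bool.and_eq_true, decide_eq_true_eq] at hi0q
  set i0 := T0 % 8 with hi0def
  have hi08 : i0 < 8 := Nat.mod_lt T0 (by norm_num)
  have hi0len : i0 < L.length := hi0q.1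
  have hi0n : i0 < n := by omega
  obtain ⟨m0, hm01, hstep0, hq0, hmin0⟩ := slot_first L i0 hi08 hi0len
  have hu0le : i0 + 8*(m0-1) ≤ T0 := hmin0 T0 rfl hq
  have hT0le : T0 ≤ i0 + 8*(m0-1) := Nat.find_le hq0
  have hu0 : i0 + 8*(m0-1) = T0 := by omega
  -- every slot's first dying step is ≥ T0
  have hstep_ge : ∀ i, i < n → ∃ mi : Nat, 1 ≤ mi ∧ stepB L i = (i:Int) + 1 + 8*((mi:Int)-1) ∧
      T0 ≤ i + 8*(mi-1) := by
    intro i hi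
    obtain ⟨mi, hmi1, hstepi, hqi, _⟩ := slot_first L i (by omega) (by omega)
    exact ⟨mi, hmi1, hstepi, Nat.find_le hqi⟩
  obtain ⟨j, hjn, hfold, hjmin⟩ := foldB L n hn1
  have hfa : func_alt L = (j:Int) + 1 := by
    simp only [func_alt, ← hndef, hfold]
  -- j must be i0
  obtain ⟨mj, hmj1, hstepj, hTj⟩ := hstep_ge j hjn
  have hle1 : stepB L j ≤ stepB L i0 := hjmin i0 hi0n
  have hstepi0 : stepB L i0 = (T0 : Int) + 1 := by
    rw [hstep0]
    push_cast
    omega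
  have huj : j + 8*(mj-1) = T0 := by
    have : stepB L j = ((j + 8*(mj-1) : Nat) : Int) + 1 := by
      rw [hstepj]; push_cast; omega
    rw [this, hstepi0] at hle1
    have : j + 8*(mj-1) ≤ T0 := by exact_mod_cast (by omega : ((j + 8*(mj-1) : Nat) : Int) ≤ (T0:Int))
    omega
  have hji0 : j = i0 := by
    have : (j + 8*(mj-1)) % 8 = j := by omega
    rw [huj] at this
    omega
  rw [hA, hfa, hji0, hi0def]
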